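-- pv_equiv track=rewrite | github.com/Hasosh/Festo-Coding-Challenge-2022 | Final_Episode/puzzle2/puzzle2.py | relevant_combinations
-- ===== SOURCE A (Python) =====
-- from itertools import combinations
--
-- def relevant_combinations(helper_list, size, upper_limit):
-- 	valid_combinations = []
-- 	for comb_raw in combinations(helper_list, size):
-- 		take_it = True
-- 		comb = (0,) + comb_raw + (upper_limit-1,)
-- 		for i in range(len(comb)-1):
-- 			if comb[i+1] - comb[i] > 2:
-- 				take_it = False
-- 				break
-- 		if take_it:
-- 			valid_combinations.append(comb)
-- 	return valid_combinations
-- ===== SOURCE B (Python) =====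
-- def relevant_combinations(helper_list, size, upper_limit):
--     ul1 = upper_limit - 1
--     def dfs(prev, k, xs):
--         if k == 0:
--             return [(ul1,)] if ul1 - prev <= 2 else []
--         out = []
--         for i, x in enumerate(xs):
--             if x - prev <= 2:
--                 for tail in dfs(x, k - 1, xs[i + 1:]):
--                     out.append((x,) + tail)
--         return out
--     return [(0,) + t for t in dfs(0, size, helper_list)]
-- ===== Notes on version B (the rewrite author's own statement) =====
-- stated objective: faster
-- what changed: B replaces A's enumeration of all C(n,size) combinations followed by a gap check with a backtracking DFS that only extends a prefix by elements within gap 2 of the previous one, pruning infeasible branches early.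
-- outside the precondition, e.g. on relevant_combinations([1, 2], -1, 5): A raises ValueError, B returns []
import Mathlib
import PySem

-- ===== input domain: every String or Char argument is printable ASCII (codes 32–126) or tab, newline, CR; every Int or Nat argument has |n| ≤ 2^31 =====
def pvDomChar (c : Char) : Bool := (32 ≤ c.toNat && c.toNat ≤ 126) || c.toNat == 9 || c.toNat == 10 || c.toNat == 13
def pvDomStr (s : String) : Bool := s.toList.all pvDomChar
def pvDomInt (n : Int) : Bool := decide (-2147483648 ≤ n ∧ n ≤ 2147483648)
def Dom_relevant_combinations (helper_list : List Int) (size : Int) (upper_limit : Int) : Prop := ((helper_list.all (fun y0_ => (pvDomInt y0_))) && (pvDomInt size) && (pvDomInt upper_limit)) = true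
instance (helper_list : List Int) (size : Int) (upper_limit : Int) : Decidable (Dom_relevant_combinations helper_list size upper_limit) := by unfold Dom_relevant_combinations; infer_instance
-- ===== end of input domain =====

-- B replaces A's filter over all C(n,size) combinations by a pruned DFS that only
-- extends prefixes whose consecutive gap stays ≤ 2 (objective: faster, asymptotic).

-- ===== PORT A =====
-- itertools.combinations(xs, r) in its lexicographic-by-index order
def combosA (xs : List Int) (r : Nat) : List (List Int) :=
  match r, xs with
  | 0, _ => [[]]
  | _+1, [] => []
  | n+1, x :: rest => ((combosA rest n).map (x :: ·)) ++ combosA rest (n+1)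
termination_by xs.length

-- the inner 'for i in range(len(comb)-1)' gap check with early break
def gapsOkA : List Int → Bool
  | a :: b :: rest => if b - a > 2 then false else gapsOkA (b :: rest)
  | _ => true

def relevant_combinations (helper_list : List Int) (size : Int) (upper_limit : Int) : List (List Int) :=
  (combosA helper_list size.toNat).foldl
    (fun acc c =>
      let comb := 0 :: c ++ [upper_limit - 1]
      if gapsOkA comb then acc ++ [comb] else acc) []

-- ===== PORT B =====
-- pruned DFS: extend the prefix only by elements within gap 2 of the previous one
def dfsB (ul1 prev k : Int) (xs : List Int) : List (List Int) :=
  if k = 0 then (if ul1 - prev ≤ 2 then [[ul1]] else []) else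
    match xs with
    | [] => []
    | x :: rest =>
        (if x - prev ≤ 2 then (dfsB ul1 x (k - 1) rest).map (x :: ·) else []) ++
        dfsB ul1 prev k rest
termination_by xs.length

def relevant_combinations_alt (helper_list : List Int) (size : Int) (upper_limit : Int) : List (List Int) :=
  (dfsB (upper_limit - 1) 0 size helper_list).map (0 :: ·)

-- ===== PRECONDITION & SPEC =====
-- Pre_ excludes size < 0, on which Python's combinations raises ValueError.
def Pre_relevant_combinations (helper_list : List Int) (size : Int) (upper_limit : Int) : Prop := 0 ≤ size
instance (helper_list : List Int) (size : Int) (upper_limit : Int) : Decidable (Pre_relevant_combinations helper_list size upper_limit) := by unfold Pre_relevant_combinations; infer_instance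
def pvWitness_relevant_combinations : List Int × Int × Int := ([1, 2, 4], 2, 6)

def Spec_relevant_combinations (helper_list : List Int) (size : Int) (upper_limit : Int) (out : List (List Int)) : Prop := out = relevant_combinations_alt helper_list size upper_limit
instance (helper_list : List Int) (size : Int) (upper_limit : Int) (out : List (List Int)) : Decidable (Spec_relevant_combinations helper_list size upper_limit out) := by unfold Spec_relevant_combinations; infer_instance

-- ===== CLAIM (what is proved, stated in full; the proofs are below) =====
def Claim_equal_relevant_combinations : Prop := ∀ (helper_list : List Int) (size : Int) (upper_limit : Int), Dom_relevant_combinations helper_list size upper_limit → Pre_relevant_combinations helper_list size upper_limit → Spec_relevant_combinations helper_list size upper_limit (relevant_combinations helper_list size upper_limit)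

-- ===== LEMMAS AND PROOFS =====

theorem foldl_filter_append {α β : Type} (f : α → β) (p : β → Bool) (l : List α) (acc : List β) :
    l.foldl (fun acc c => if p (f c) then acc ++ [f c] else acc) acc
      = acc ++ ((l.map f).filter p) := by
  induction l generalizing acc with
  | nil => simp
  | cons x xs ih =>
      simp only [List.foldl, List.map, List.filter]
      by_cases h : p (f x) <;> simp [h, ih]

theorem gapsOkA_cons (a b : Int) (rest : List Int) :
    gapsOkA (a :: b :: rest) = ((decide (b - a ≤ 2)) && gapsOkA (b :: rest)) := by
  simp only [gapsOkA]
  by_cases h : b - a > 2 <;> simp [h] <;> omega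

theorem dfsB_base (ul1 prev : Int) :
    (if ul1 - prev ≤ 2 then ([[ul1]] : List (List Int)) else [])
      = List.filter (fun c => gapsOkA (prev :: c)) [[ul1]] := by
  by_cases h : ul1 - prev ≤ 2
  · rw [if_pos h]
    have h2 : ¬ (ul1 - prev > 2) := by omega
    simp [List.filter, gapsOkA, h2]
  · rw [if_neg h]
    have h2 : ul1 - prev > 2 := by omega
    simp [List.filter, gapsOkA, h2]

theorem dfsB_eq (ul1 : Int) (k : Nat) (prev : Int) (xs : List Int) :
    dfsB ul1 prev (k : Int) xs
      = ((combosA xs k).map (fun c => c ++ [ul1])).filter (fun c => gapsOkA (prev :: c)) := by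
  induction xs generalizing k prev with
  | nil =>
      cases k with
      | zero =>
          rw [dfsB]
          simpa [combosA] using dfsB_base ul1 prev
      | succ n =>
          rw [dfsB]
          simp [combosA]
          omega
  | cons x rest ih =>
      cases k with
      | zero =>
          rw [dfsB]
          simpa [combosA] using dfsB_base ul1 prev
      | succ n =>
          rw [dfsB]
          have hk : ¬ ((n : Int) + 1 = 0) := by omega
          have h1 : ((n : Int) + 1) - 1 = (n : Int) := by omega
          simp only [Nat.cast_succ, hk, if_false, h1, combosA, List.map_append,
            List.filter_append, List.map_map]
          congr 1
      -- first branch: prefixes starting with x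
          · by_cases hx : x - prev ≤ 2
            · have hpp : ∀ c : List Int, gapsOkA (prev :: x :: c) = gapsOkA (x :: c) := by
                intro c
                rw [gapsOkA_cons]
                simp [hx]
              simp only [hx, if_true, ih n x, List.filter_map, List.map_map]
              congr 1
              apply List.filter_congr
              intro c _
              simp only [Function.comp_apply, List.cons_append]
              exact (hpp (c ++ [ul1])).symm
            · have hpp : ∀ c : List Int, gapsOkA (prev :: x :: c) = false := by
                intro c
                rw [gapsOkA_cons]
                simp
                omega
              simp only [hx, if_false]
              rw [eq_comm, List.filter_eq_nil_iff]
              intro c hc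
              simp only [List.mem_map] at hc
              obtain ⟨d, _, rfl⟩ := hc
              simp [Function.comp, hpp]
          · exact ih (n+1) prev

-- ===== VERDICT (by name: the statement is the Claim_ definition above) =====
theorem relevant_combinations_spec : Claim_equal_relevant_combinations := by
  intro hl size ul _ hpre
  unfold Spec_relevant_combinations relevant_combinations relevant_combinations_alt
  rw [show size = ((size.toNat : Nat) : Int) from (Int.toNat_of_nonneg hpre).symm]
  rw [dfsB_eq, Int.toNat_natCast]
  rw [foldl_filter_append (fun c => 0 :: c ++ [ul - 1]) gapsOkA]
  simp only [List.nil_append, List.filter_map, List.map_map]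
  simp [Function.comp_def]
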